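-- pv_equiv track=rewrite | github.com/burning-calamity/extirpation | src/extirpation/bundled_online/nihilist_substitution.py | _keyed_square
-- ===== SOURCE A (Python) =====
-- ALPHABET = 'ABCDEFGHIKLMNOPQRSTUVWXYZ'
--
-- def _normalize(text: str) -> str:
--     return ''.join(('I' if ch == 'J' else ch) for ch in text.upper() if ch.isalpha())
--
-- def _keyed_square(keyword: str = '') -> str:
--     seen: set[str] = set()
--     out: list[str] = []
--     for ch in _normalize(keyword) + ALPHABET:
--         if ch not in seen:
--             seen.add(ch)
--             out.append(ch)
--     return ''.join(out)
-- ===== SOURCE B (Python) =====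
-- ALPHABET = 'ABCDEFGHIKLMNOPQRSTUVWXYZ'
--
-- def _normalize(text: str) -> str:
--     return ''.join(('I' if ch == 'J' else ch) for ch in text.upper() if ch.isalpha())
--
-- def _keyed_square(keyword: str = '') -> str:
--     # Rank-and-sort: no dedup pass at all.  Each alphabet letter gets a numeric
--     # rank (first-occurrence index in the normalized keyword, or, if absent,
--     # len(norm) + its alphabet position); sorting ALPHABET by that rank yields
--     # the keyed square.
--     norm = _normalize(keyword)
--     def rank(c: str) -> int:
--         i = norm.find(c)
--         return i if i >= 0 else len(norm) + ALPHABET.index(c)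
--     return ''.join(sorted(ALPHABET, key=rank))
-- ===== Notes on version B (the rewrite author's own statement) =====
-- stated objective: alternative
-- what changed: B computes a numeric rank for each of the 25 fixed-alphabet letters (first-occurrence index in the normalized keyword, else len(norm)+alphabet position) and sorts ALPHABET by that key; A instead makes one seen-set dedup pass over keyword+ALPHABET. No dedup or seen-set exists in B.
import Mathlib
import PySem

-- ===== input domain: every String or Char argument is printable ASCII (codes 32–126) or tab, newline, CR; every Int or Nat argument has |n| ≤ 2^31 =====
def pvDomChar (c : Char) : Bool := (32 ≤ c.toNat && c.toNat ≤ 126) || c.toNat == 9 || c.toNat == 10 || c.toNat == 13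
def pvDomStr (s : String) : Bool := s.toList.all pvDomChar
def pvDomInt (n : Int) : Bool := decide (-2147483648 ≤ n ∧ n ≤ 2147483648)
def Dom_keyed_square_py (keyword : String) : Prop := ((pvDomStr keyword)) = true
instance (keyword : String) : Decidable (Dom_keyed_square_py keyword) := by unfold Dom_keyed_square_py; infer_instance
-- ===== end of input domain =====

-- B replaces A's seen-set dedup pass by ranking each fixed-alphabet letter and sorting the alphabet by that key (alternative algorithm; same cost).

-- ===== PORT A =====
def pvALPHABET : List Char := "ABCDEFGHIKLMNOPQRSTUVWXYZ".toList

-- _normalize: upper, keep alpha, J→I (shared module helper of both Pythons)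
def normalize_py (text : String) : List Char :=
  ((PySem.Str.upper text).toList.filter (fun ch => PySem.Chars.isalpha ch)).map
    (fun ch => if ch = 'J' then 'I' else ch)

def keyed_square_py (keyword : String) : String :=
  String.ofList
    ((normalize_py keyword ++ pvALPHABET).foldl
      (fun (st : PySem.Set Char × List Char) ch =>
        if PySem.Set.contains st.1 ch then st else (PySem.Set.add st.1 ch, st.2 ++ [ch]))
      (PySem.Set.empty, [])).2

-- ===== PORT B =====
-- the inner 'def rank' of Source B (a closure over norm)
def rank_alt (norm : List Char) (c : Char) : Int :=
  let i := PySem.Chars.find norm [c]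
  if 0 ≤ i then i
  -- ALPHABET.index(c): c is always a letter of ALPHABET when rank is called, so
  -- index? is some; .getD 0 only totalizes the unreachable none branch.
  else (norm.length : Int) + (((PySem.List.index? pvALPHABET c).getD 0 : Nat) : Int)

def keyed_square_py_alt (keyword : String) : String :=
  String.ofList (PySem.List.sorted pvALPHABET (rank_alt (normalize_py keyword)) false)

-- ===== PRECONDITION & SPEC =====
def Spec_keyed_square_py (keyword : String) (out : String) : Prop := out = keyed_square_py_alt keyword
instance (keyword : String) (out : String) : Decidable (Spec_keyed_square_py keyword out) := by unfold Spec_keyed_square_py; infer_instance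

-- ===== CLAIM (what is proved, stated in full; the proofs are below) =====
def Claim_equal_keyed_square_py : Prop := ∀ (keyword : String), Dom_keyed_square_py keyword → Spec_keyed_square_py keyword (keyed_square_py keyword)

-- ===== LEMMAS AND PROOFS =====

-- ordered first-occurrence dedup, the shape of A's accumulator (proof-only)
def pvDedup (l : List Char) : List Char :=
  l.foldl (fun u ch => if ch ∈ u then u else u ++ [ch]) []

-- A's pair-state fold keeps seen = out, so both components are the plain list fold
theorem foldA_diag (l : List Char) : ∀ (s : List Char),
    l.foldl (fun (st : PySem.Set Char × List Char) ch =>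
        if PySem.Set.contains st.1 ch then st else (PySem.Set.add st.1 ch, st.2 ++ [ch]))
      (s, s)
    = (l.foldl (fun used ch => if ch ∈ used then used else used ++ [ch]) s,
       l.foldl (fun used ch => if ch ∈ used then used else used ++ [ch]) s) := by
  induction l with
  | nil => intro s; rfl
  | cons a l ih =>
    intro s
    simp only [List.foldl_cons]
    by_cases h : a ∈ s
    · have hc : PySem.Set.contains s a = true := by
        simp [PySem.Set.contains_eq_listContains, h]
      rw [hc, if_pos h]
      simpa using ih s
    · have hc : PySem.Set.contains s a = false := by
        simp [PySem.Set.contains_eq_listContains, h]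
      rw [hc, if_neg h, PySem.Set.add_of_not_mem h]
      simpa using ih (s ++ [a])

-- folding a Nodup list into the dedup accumulator appends exactly the new elements
theorem fold_nodup (l : List Char) (hl : l.Nodup) : ∀ (u : List Char),
    l.foldl (fun used ch => if ch ∈ used then used else used ++ [ch]) u
    = u ++ l.filter (fun c => decide (c ∉ u)) := by
  induction l with
  | nil => intro u; simp
  | cons a l ih =>
    intro u
    rcases List.nodup_cons.mp hl with ⟨ha, hl'⟩
    simp only [List.foldl_cons, List.filter_cons]
    by_cases h : a ∈ u
    · rw [if_pos h, ih hl' u]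
      simp [h]
    · rw [if_neg h, ih hl' (u ++ [a])]
      have hfilt : l.filter (fun c => decide (c ∉ u ++ [a]))
          = l.filter (fun c => decide (c ∉ u)) := by
        apply List.filter_congr
        intro x hx
        have hxa : x ≠ a := fun e => ha (e ▸ hx)
        simp [List.mem_append, hxa]
      rw [hfilt]
      simp [h, List.append_assoc]

theorem pvALPHABET_nodup : pvALPHABET.Nodup := by decide

theorem pvDedup_append_singleton (l : List Char) (c : Char) :
    pvDedup (l ++ [c]) = if c ∈ pvDedup l then pvDedup l else pvDedup l ++ [c] := by
  simp [pvDedup, List.foldl_append]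

theorem mem_pvDedup (l : List Char) (x : Char) : x ∈ pvDedup l ↔ x ∈ l := by
  induction l using List.reverseRecOn with
  | nil => simp [pvDedup]
  | append_singleton l c ih =>
    rw [pvDedup_append_singleton]
    by_cases h : c ∈ pvDedup l
    · rw [if_pos h]
      simp only [List.mem_append, List.mem_singleton, ih]
      constructor
      · exact Or.inl
      · rintro (hx | rfl)
        · exact hx
        · exact ih.mp h
    · rw [if_neg h]; simp [ih]

theorem nodup_pvDedup (l : List Char) : (pvDedup l).Nodup := by
  induction l using List.reverseRecOn with
  | nil => simp [pvDedup]
  | append_singleton l c ih =>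
    rw [pvDedup_append_singleton]
    by_cases h : c ∈ pvDedup l
    · rw [if_pos h]; exact ih
    · rw [if_neg h, List.nodup_append]
      exact ⟨ih, List.nodup_singleton c, fun a ha b hb => by
        rw [List.mem_singleton] at hb; subst hb; exact fun e => h (e ▸ ha)⟩

theorem idxOf_append_singleton_not_mem (l : List Char) (c : Char) (h : c ∉ l) :
    (l ++ [c]).idxOf c = l.length := by
  induction l with
  | nil => simp
  | cons a t ih =>
    have hac : a ≠ c := by rintro rfl; exact h (List.mem_cons_self)
    simp only [List.cons_append, List.idxOf_cons_ne _ hac, List.length_cons]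
    rw [ih (fun hm => h (List.mem_cons_of_mem _ hm))]

-- dedup lists its elements in strictly increasing first-occurrence order
theorem pairwise_pvDedup (l : List Char) :
    (pvDedup l).Pairwise (fun a b => l.idxOf a < l.idxOf b) := by
  induction l using List.reverseRecOn with
  | nil => simp [pvDedup]
  | append_singleton l c ih =>
    have htrans : ∀ a ∈ pvDedup l, ∀ b ∈ pvDedup l,
        l.idxOf a < l.idxOf b → (l ++ [c]).idxOf a < (l ++ [c]).idxOf b := by
      intro a ha b hb hab
      rw [List.idxOf_append_of_mem ((mem_pvDedup l a).mp ha),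
          List.idxOf_append_of_mem ((mem_pvDedup l b).mp hb)]
      exact hab
    rw [pvDedup_append_singleton]
    by_cases h : c ∈ pvDedup l
    · rw [if_pos h]
      exact List.Pairwise.imp_of_mem (fun ha hb => htrans _ ha _ hb) ih
    · rw [if_neg h]
      have hc : c ∉ l := fun hcl => h ((mem_pvDedup l c).mpr hcl)
      rw [List.pairwise_append]
      refine ⟨List.Pairwise.imp_of_mem (fun ha hb => htrans _ ha _ hb) ih, by simp, ?_⟩
      intro a ha b hb
      rw [List.mem_singleton] at hb
      subst hb
      have hal : a ∈ l := (mem_pvDedup l a).mp ha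
      rw [List.idxOf_append_of_mem hal, idxOf_append_singleton_not_mem l b hc]
      exact List.idxOf_lt_length_of_mem hal

-- [c] is a prefix exactly of lists beginning with c
theorem singleton_prefix_iff (c : Char) (t : List Char) : [c] <+: t ↔ t.head? = some c := by
  cases t with
  | nil => simp
  | cons a t => simp [List.cons_prefix_cons, eq_comm]

-- a first occurrence at n pins idxOf
theorem idxOf_eq_of_first (c : Char) : ∀ (l : List Char) (n : Nat),
    l[n]? = some c → (∀ i < n, l[i]? ≠ some c) → l.idxOf c = n := by
  intro l
  induction l with
  | nil => intro n h _; simp at h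
  | cons a t ih =>
    intro n h hmin
    cases n with
    | zero =>
      simp only [List.getElem?_cons_zero, Option.some_inj] at h
      simp [h]
    | succ n =>
      have hac : a ≠ c := by
        intro e
        exact hmin 0 (Nat.succ_pos n) (by simp [e])
      rw [List.idxOf_cons_ne _ hac, ih n (by simpa using h)
        (fun i hi => by simpa using hmin (i + 1) (Nat.succ_lt_succ hi))]

theorem find_singleton_of_not_mem (l : List Char) (c : Char) (h : c ∉ l) :
    PySem.Chars.find l [c] = -1 := by
  rw [PySem.Chars.find_eq_neg_one_iff]
  intro hinf
  exact h (hinf.subset (List.mem_singleton_self c))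

theorem find_singleton_of_mem (l : List Char) (c : Char) (h : c ∈ l) :
    PySem.Chars.find l [c] = (l.idxOf c : Int) := by
  have hinf : [c] <:+: l := by
    rcases List.append_of_mem h with ⟨s, t, rfl⟩
    exact ⟨s, t, by simp⟩
  have h0 : 0 ≤ PySem.Chars.find l [c] := (PySem.Chars.find_nonneg_iff l [c]).mpr hinf
  rcases PySem.Chars.find_spec (s := l) (sub := [c]) h0 with ⟨hpre, hmin⟩
  have hget : l[(PySem.Chars.find l [c]).toNat]? = some c := by
    have := (singleton_prefix_iff c (l.drop (PySem.Chars.find l [c]).toNat)).mp hpre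
    simpa [List.head?_drop] using this
  have hidx : l.idxOf c = (PySem.Chars.find l [c]).toNat := by
    refine idxOf_eq_of_first c l _ hget ?_
    intro i hi he
    exact hmin i hi ((singleton_prefix_iff c (l.drop i)).mpr (by simpa [List.head?_drop] using he))
  omega

-- first index via Python's list.index agrees with idxOf on members
theorem index?_getD_eq_idxOf (l : List Char) (c : Char) (h : c ∈ l) :
    ((PySem.List.index? l c).getD 0 : Nat) = l.idxOf c := by
  induction l with
  | nil => simp at h
  | cons a t ih =>
    by_cases hac : a = c
    · subst hac; rw [PySem.List.index?_cons_self]; simp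
    · rw [PySem.List.index?_cons_of_ne t hac]
      rcases List.mem_cons.mp h with rfl | ht
      · exact absurd rfl hac
      · rcases Option.isSome_iff_exists.mp
          ((PySem.List.index?_isSome_iff t c).mpr ht) with ⟨k, hk⟩
        rw [List.idxOf_cons_ne _ hac, ← ih ht, hk]
        rfl

-- Char.ofNat round-trips on small codes
theorem pvCharToNatOfNat (n : Nat) (h : n < 55296) : (Char.ofNat n).toNat = n := by
  have hv : Nat.isValidChar n := Or.inl h
  rw [Char.ofNat, dif_pos hv]
  simp [Char.ofNatAux, Char.toNat]

-- the to-uppercase of an alphabetic character is an uppercase letter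
theorem upperChar_mem_range (ch : Char)
    (h : PySem.Chars.isalpha (PySem.Chars.upperChar ch) = true) :
    65 ≤ (PySem.Chars.upperChar ch).toNat ∧ (PySem.Chars.upperChar ch).toNat ≤ 90 := by
  by_cases hl : PySem.Chars.islower ch = true
  · have hb : 97 ≤ ch.toNat ∧ ch.toNat ≤ 122 := by
      simp only [PySem.Chars.islower, Bool.and_eq_true, decide_eq_true_eq, Char.le_def] at hl
      exact ⟨hl.1, hl.2⟩
    rw [PySem.Chars.upperChar, if_pos hl]
    have hv : (Char.ofNat (ch.toNat - 32)).toNat = ch.toNat - 32 :=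
      pvCharToNatOfNat _ (by omega)
    omega
  · rw [PySem.Chars.upperChar, if_neg hl] at h ⊢
    simp only [PySem.Chars.isalpha, Bool.or_eq_true] at h
    rcases h with h | h
    · simp only [PySem.Chars.isupper, Bool.and_eq_true, decide_eq_true_eq, Char.le_def] at h
      exact ⟨h.1, h.2⟩
    · exact absurd h hl

-- every character with an uppercase code other than 'J' is an alphabet letter
theorem mem_pvALPHABET_of (c : Char) (h1 : 65 ≤ c.toNat) (h2 : c.toNat ≤ 90)
    (h3 : c.toNat ≠ 74) : c ∈ pvALPHABET := by
  have hc : Char.ofNat c.toNat = c := Char.ofNat_toNat c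
  rw [← hc]
  interval_cases h : c.toNat <;> first | rfl | decide | omega

-- every normalized-keyword letter lies in the 25-letter alphabet
theorem normalize_subset (keyword : String) (x : Char) (hx : x ∈ normalize_py keyword) :
    x ∈ pvALPHABET := by
  simp only [normalize_py, List.mem_map, List.mem_filter] at hx
  rcases hx with ⟨u, ⟨hu, halpha⟩, rfl⟩
  have hbounds : 65 ≤ u.toNat ∧ u.toNat ≤ 90 := by
    simp only [PySem.Str.toList_upper, PySem.Chars.upper, List.mem_map] at hu
    rcases hu with ⟨ch, _, rfl⟩
    exact upperChar_mem_range ch halpha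
  by_cases hj : u = 'J'
  · subst hj; decide
  · rw [if_neg hj]
    refine mem_pvALPHABET_of u hbounds.1 hbounds.2 ?_
    intro h74
    exact hj (by rw [← Char.ofNat_toNat u, h74])

theorem pairwise_pvALPHABET :
    pvALPHABET.Pairwise (fun a b => pvALPHABET.idxOf a < pvALPHABET.idxOf b) := by decide

-- the sorted-by-rank alphabet is exactly dedup(norm) ++ the untouched rest of the alphabet
theorem sorted_rank_eq (N : List Char) (hN : ∀ x ∈ N, x ∈ pvALPHABET) :
    PySem.List.sorted pvALPHABET (rank_alt N) false
    = pvDedup N ++ pvALPHABET.filter (fun c => decide (c ∉ pvDedup N)) := by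
  have hrankD : ∀ c ∈ pvDedup N, rank_alt N c = (N.idxOf c : Int) := by
    intro c hc
    have hcN : c ∈ N := (mem_pvDedup N c).mp hc
    simp [rank_alt, find_singleton_of_mem N c hcN]
  have hrankF : ∀ c, c ∈ pvALPHABET → c ∉ pvDedup N →
      rank_alt N c = (N.length : Int) + (pvALPHABET.idxOf c : Int) := by
    intro c hcA hcD
    have hcN : c ∉ N := fun hcN => hcD ((mem_pvDedup N c).mpr hcN)
    rw [rank_alt]
    simp only [find_singleton_of_not_mem N c hcN]
    rw [if_neg (by omega), index?_getD_eq_idxOf pvALPHABET c hcA]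
  apply PySem.List.sorted_eq_of_perm_of_pairwise_lt
  · -- permutation of the alphabet
    rw [List.perm_ext_iff_of_nodup ?_ pvALPHABET_nodup]
    · intro a
      simp only [List.mem_append, List.mem_filter, decide_eq_true_eq]
      constructor
      · rintro (ha | ⟨ha, _⟩)
        · exact hN a ((mem_pvDedup N a).mp ha)
        · exact ha
      · intro ha
        by_cases hD : a ∈ pvDedup N
        · exact Or.inl hD
        · exact Or.inr ⟨ha, hD⟩
    · rw [List.nodup_append]
      refine ⟨nodup_pvDedup N, pvALPHABET_nodup.filter _, ?_⟩
      intro a ha b hb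
      rcases List.mem_filter.mp hb with ⟨_, hb'⟩
      rintro rfl
      exact (decide_eq_true_eq.mp hb') ha
  · -- ranks strictly increase along dedup(N) ++ rest
    rw [List.pairwise_append]
    refine ⟨?_, ?_, ?_⟩
    · refine List.Pairwise.imp_of_mem ?_ (pairwise_pvDedup N)
      intro a b ha hb hab
      rw [hrankD a ha, hrankD b hb]
      exact_mod_cast hab
    · refine List.Pairwise.imp_of_mem ?_
        (List.Pairwise.sublist List.filter_sublist pairwise_pvALPHABET)
      intro a b ha hb hab
      rcases List.mem_filter.mp ha with ⟨haA, haD⟩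
      rcases List.mem_filter.mp hb with ⟨hbA, hbD⟩
      rw [hrankF a haA (decide_eq_true_eq.mp haD),
        hrankF b hbA (decide_eq_true_eq.mp hbD)]
      omega
    · intro a ha b hb
      rcases List.mem_filter.mp hb with ⟨hbA, hbD⟩
      have haN : a ∈ N := (mem_pvDedup N a).mp ha
      rw [hrankD a ha, hrankF b hbA (decide_eq_true_eq.mp hbD)]
      have := List.idxOf_lt_length_of_mem haN
      omega

-- ===== VERDICT (by name: the statement is the Claim_ definition above) =====
theorem keyed_square_py_spec : Claim_equal_keyed_square_py := by
  intro keyword _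
  unfold Spec_keyed_square_py keyed_square_py keyed_square_py_alt
  have hempty : (PySem.Set.empty : PySem.Set Char) = ([] : List Char) := rfl
  rw [List.foldl_append, hempty, foldA_diag, foldA_diag,
    fold_nodup pvALPHABET pvALPHABET_nodup,
    sorted_rank_eq (normalize_py keyword) (normalize_subset keyword)]
  rfl
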